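-- pv_equiv track=rewrite | github.com/arcadie2k/python-ia | src/utils/queens_hill_climbing.py | move_queen
-- ===== SOURCE A (Python) =====
-- def calculate_attacks(board):
--     N = len(board)
--     attacks = 0
--     for i in range(N):
--         for j in range(N):
--             if board[i][j] == 1:
--                 # Verificăm orizontal și vertical
--                 for k in range(N):
--                     if board[i][k] == 1 and k != j:
--                         attacks += 1
--                     if board[k][j] == 1 and k != i:
--                         attacks += 1
--                 # Verificăm diagonală principală
--                 k = 1
--                 while i + k < N and j + k < N:
--                     if board[i + k][j + k] == 1:
--                         attacks += 1
--                     k += 1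
--                 k = 1
--                 while i - k >= 0 and j - k >= 0:
--                     if board[i - k][j - k] == 1:
--                         attacks += 1
--                     k += 1
--                 # Verificăm diagonală secundară
--                 k = 1
--                 while i - k >= 0 and j + k < N:
--                     if board[i - k][j + k] == 1:
--                         attacks += 1
--                     k += 1
--                 k = 1
--                 while i + k < N and j - k >= 0:
--                     if board[i + k][j - k] == 1:
--                         attacks += 1
--                     k += 1
--     return attacks
--
-- def move_queen(board):
--     N = len(board)
--     best_attacks = calculate_attacks(board)
--     best_board = board
--     moves_available = False  # Variabilă de control pentru a indica dacă există o mișcare validă disponibilă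
--
--     for i in range(N):
--         for j in range(N):
--             if board[i][j] == 1:
--                 for k in range(N):
--                     if k != j:
--                         board[i][j] = 0
--                         board[i][k] = 1
--                         attacks = calculate_attacks(board)
--                         if attacks < best_attacks:
--                             best_attacks = attacks
--                             best_board = [row[:] for row in board]  # Creăm o copie a tablei
--                             moves_available = True  # Setăm variabila de control la True pentru a indica că există o mișcare validă
--                         board[i][j] = 1
--                         board[i][k] = 0
--
--     if not moves_available:
--         return board
--
--     return best_board
-- ===== SOURCE B (Python) =====
-- def move_queen(board):
--     # Incremental re-implementation: replay the same scan, but keep per-line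
--     # queen counters and the current attack total, updating them in O(1) per
--     # cell write instead of recounting the whole board for every candidate.
--     # (A mutates its argument in place; B leaves it untouched -- the return
--     # value is identical.)
--     N = len(board)
--     cur = [r[:] for r in board]
--
--     row = {}
--     col = {}
--     dg = {}
--     ad = {}
--     queens = [(i, j) for i in range(N) for j in range(N) if cur[i][j] == 1]
--     for (i, j) in queens:
--         row[i] = row.get(i, 0) + 1
--         col[j] = col.get(j, 0) + 1
--         dg[i - j] = dg.get(i - j, 0) + 1
--         ad[i + j] = ad.get(i + j, 0) + 1
--     T = 0
--     for (i, j) in queens: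
--         T += (row[i] - 1) + (col[j] - 1) + (dg[i - j] - 1) + (ad[i + j] - 1)
--
--     def _put(i, j, v):
--         # write v into cur[i][j], keeping counters and total T exact
--         nonlocal T
--         old = cur[i][j]
--         if old == 1 and v != 1:
--             row[i] -= 1
--             col[j] -= 1
--             dg[i - j] -= 1
--             ad[i + j] -= 1
--             T -= 2 * (row[i] + col[j] + dg[i - j] + ad[i + j])
--         elif old != 1 and v == 1:
--             T += 2 * (row.get(i, 0) + col.get(j, 0) + dg.get(i - j, 0) + ad.get(i + j, 0))
--             row[i] = row.get(i, 0) + 1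
--             col[j] = col.get(j, 0) + 1
--             dg[i - j] = dg.get(i - j, 0) + 1
--             ad[i + j] = ad.get(i + j, 0) + 1
--         cur[i][j] = v
--
--     best = T
--     best_board = cur
--     moved = False
--     for i in range(N):
--         for j in range(N):
--             if cur[i][j] == 1:
--                 for k in range(N):
--                     if k != j:
--                         _put(i, j, 0)
--                         _put(i, k, 1)
--                         if T < best:
--                             best = T
--                             best_board = [r[:] for r in cur]
--                             moved = True
--                         _put(i, j, 1)
--                         _put(i, k, 0)
--
--     if not moved:
--         return cur
--     return best_board
-- ===== Notes on version B (the rewrite author's own statement) =====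
-- stated objective: faster
-- what changed: Instead of recomputing calculate_attacks with a full O(N^2) board scan for every candidate move, B maintains per-row/column/diagonal queen counters and a running attack total that it updates in O(1) per cell write while replaying the same scan in the same order, so each candidate is evaluated in constant time.
import Mathlib
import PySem

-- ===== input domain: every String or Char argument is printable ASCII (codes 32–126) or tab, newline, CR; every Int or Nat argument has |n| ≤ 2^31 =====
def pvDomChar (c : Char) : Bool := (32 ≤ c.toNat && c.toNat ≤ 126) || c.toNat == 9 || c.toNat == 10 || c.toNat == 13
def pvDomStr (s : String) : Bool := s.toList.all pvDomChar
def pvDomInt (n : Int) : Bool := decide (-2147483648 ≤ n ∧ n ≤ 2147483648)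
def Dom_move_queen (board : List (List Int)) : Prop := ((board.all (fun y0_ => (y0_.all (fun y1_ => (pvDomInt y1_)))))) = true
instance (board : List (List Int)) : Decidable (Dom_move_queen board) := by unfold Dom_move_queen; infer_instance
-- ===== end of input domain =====

-- B replaces A's full-board attack recount per candidate move (calculate_attacks,
-- a fresh O(N^2) scan per candidate) by per-line queen counters and a running
-- attack total maintained in O(1) per cell write, replaying the same scan in the
-- same order.  A mutates its argument in place, B does not; the equivalence
-- proved here is about the return value.

-- ===== PORT A =====

-- board[i][j] for Nat indices (in range under Pre_; helper shared by both ports)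
def cell (b : List (List Int)) (i j : Nat) : Int := (b.getD i []).getD j 0
-- board[i][j] = v
def setCell (b : List (List Int)) (i j : Nat) (v : Int) : List (List Int) :=
  b.set i ((b.getD i []).set j v)

-- literal port of calculate_attacks; the four `while` ray walks are ported as
-- bounded folds over range N with the (monotone) loop guard kept as a filter,
-- visiting exactly the same cells
def calcAttacks (b : List (List Int)) : Int :=
  let N := b.length
  (List.range N).foldl (fun acc i =>
    (List.range N).foldl (fun acc j =>
      if cell b i j = 1 then
        let acc := (List.range N).foldl (fun acc k =>
          let acc := if cell b i k = 1 ∧ k ≠ j then acc + 1 else acc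
          if cell b k j = 1 ∧ k ≠ i then acc + 1 else acc) acc
        let acc := (List.range N).foldl (fun acc k =>
          if i + k + 1 < N ∧ j + k + 1 < N ∧ cell b (i+k+1) (j+k+1) = 1 then acc + 1 else acc) acc
        let acc := (List.range N).foldl (fun acc k =>
          if k + 1 ≤ i ∧ k + 1 ≤ j ∧ cell b (i-(k+1)) (j-(k+1)) = 1 then acc + 1 else acc) acc
        let acc := (List.range N).foldl (fun acc k =>
          if k + 1 ≤ i ∧ j + k + 1 < N ∧ cell b (i-(k+1)) (j+k+1) = 1 then acc + 1 else acc) acc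
        (List.range N).foldl (fun acc k =>
          if i + k + 1 < N ∧ k + 1 ≤ j ∧ cell b (i+k+1) (j-(k+1)) = 1 then acc + 1 else acc) acc
      else acc) acc) 0

-- the mutable state of A's move loop: board being edited in place, best_attacks,
-- best_board, moves_available
structure StA where
  cur : List (List Int)
  ba : Int
  bb : List (List Int)
  mv : Bool

def stepA (i j : Nat) (s : StA) (k : Nat) : StA :=
  if k ≠ j then
    let b1 := setCell s.cur i j 0
    let b2 := setCell b1 i k 1
    let a := calcAttacks b2
    let upd := if a < s.ba then (a, b2, true) else (s.ba, s.bb, s.mv)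
    let b3 := setCell b2 i j 1
    let b4 := setCell b3 i k 0
    ⟨b4, upd.1, upd.2.1, upd.2.2⟩
  else s

def loopA (N : Nat) (s0 : StA) : StA :=
  (List.range N).foldl (fun s i =>
    (List.range N).foldl (fun s j =>
      if cell s.cur i j = 1 then (List.range N).foldl (stepA i j) s else s) s) s0

def move_queen (board : List (List Int)) : List (List Int) :=
  let N := board.length
  let s := loopA N ⟨board, calcAttacks board, board, false⟩
  if s.mv = false then s.cur else s.bb

-- ===== PORT B =====

-- [(i, j) for i in range(N) for j in range(N) if cur[i][j] == 1]
def queensOf (b : List (List Int)) (N : Nat) : List (Nat × Nat) :=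
  (List.range N).flatMap (fun i =>
    ((List.range N).filter (fun j => cell b i j = 1)).map (fun j => (i, j)))

-- B's state: board copy, four counter dicts, attack total T, best, best_board, moved
structure StB where
  cur : List (List Int)
  row : PySem.Dict Int Int
  col : PySem.Dict Int Int
  dg : PySem.Dict Int Int
  ad : PySem.Dict Int Int
  T : Int
  best : Int
  bb : List (List Int)
  mv : Bool

-- _put(i, j, v): write keeping counters and T exact (row[i] -= 1 on a present key
-- is ported as modify with default 0, exact because the key is present)
def bPut (s : StB) (i j : Nat) (v : Int) : StB :=
  let old := cell s.cur i j
  if old = 1 ∧ v ≠ 1 then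
    let row := s.row.modify (i : Int) 0 (· - 1)
    let col := s.col.modify (j : Int) 0 (· - 1)
    let dg := s.dg.modify ((i : Int) - (j : Int)) 0 (· - 1)
    let ad := s.ad.modify ((i : Int) + (j : Int)) 0 (· - 1)
    let T := s.T - 2 * (row.getD (i : Int) 0 + col.getD (j : Int) 0 +
                        dg.getD ((i : Int) - (j : Int)) 0 + ad.getD ((i : Int) + (j : Int)) 0)
    ⟨setCell s.cur i j v, row, col, dg, ad, T, s.best, s.bb, s.mv⟩
  else if old ≠ 1 ∧ v = 1 then
    let T := s.T + 2 * (s.row.getD (i : Int) 0 + s.col.getD (j : Int) 0 +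
                        s.dg.getD ((i : Int) - (j : Int)) 0 + s.ad.getD ((i : Int) + (j : Int)) 0)
    ⟨setCell s.cur i j v,
     s.row.modify (i : Int) 0 (· + 1), s.col.modify (j : Int) 0 (· + 1),
     s.dg.modify ((i : Int) - (j : Int)) 0 (· + 1), s.ad.modify ((i : Int) + (j : Int)) 0 (· + 1),
     T, s.best, s.bb, s.mv⟩
  else
    ⟨setCell s.cur i j v, s.row, s.col, s.dg, s.ad, s.T, s.best, s.bb, s.mv⟩

def stepB (i j : Nat) (s : StB) (k : Nat) : StB :=
  if k ≠ j then
    let s1 := bPut s i j 0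
    let s2 := bPut s1 i k 1
    let s3 := if s2.T < s2.best then { s2 with best := s2.T, bb := s2.cur, mv := true } else s2
    let s4 := bPut s3 i j 1
    bPut s4 i k 0
  else s

def loopB (N : Nat) (s0 : StB) : StB :=
  (List.range N).foldl (fun s i =>
    (List.range N).foldl (fun s j =>
      if cell s.cur i j = 1 then (List.range N).foldl (stepB i j) s else s) s) s0

-- the four counter dicts of the initial board
def countersOf (qs : List (Nat × Nat)) :
    PySem.Dict Int Int × PySem.Dict Int Int × PySem.Dict Int Int × PySem.Dict Int Int :=
  qs.foldl (fun c q =>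
      (c.1.modify (q.1 : Int) 0 (· + 1), c.2.1.modify (q.2 : Int) 0 (· + 1),
       c.2.2.1.modify ((q.1 : Int) - (q.2 : Int)) 0 (· + 1), c.2.2.2.modify ((q.1 : Int) + (q.2 : Int)) 0 (· + 1)))
    (PySem.Dict.empty, PySem.Dict.empty, PySem.Dict.empty, PySem.Dict.empty)

-- base attack total from the counters
def tInit (qs : List (Nat × Nat)) (row col dg ad : PySem.Dict Int Int) : Int :=
  qs.foldl (fun T q =>
      T + (row.getD (q.1 : Int) 0 - 1) + (col.getD (q.2 : Int) 0 - 1) +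
          (dg.getD ((q.1 : Int) - (q.2 : Int)) 0 - 1) + (ad.getD ((q.1 : Int) + (q.2 : Int)) 0 - 1)) 0

def move_queen_alt (board : List (List Int)) : List (List Int) :=
  let N := board.length
  let cur := board
  let qs := queensOf cur N
  let c := countersOf qs
  let T := tInit qs c.1 c.2.1 c.2.2.1 c.2.2.2
  let s := loopB N ⟨cur, c.1, c.2.1, c.2.2.1, c.2.2.2, T, T, cur, false⟩
  if s.mv = false then s.cur else s.bb

-- ===== PRECONDITION & SPEC =====

-- Pre_: exactly the inputs on which A returns (A reads columns 0..N-1 of every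
-- row; a row shorter than the board raises IndexError in both programs)
def Pre_move_queen (board : List (List Int)) : Prop :=
  ∀ r ∈ board, board.length ≤ r.length
instance (board : List (List Int)) : Decidable (Pre_move_queen board) := by
  unfold Pre_move_queen; infer_instance

def pvWitness_move_queen : List (List Int) := [[1, 0, 0], [0, 0, 1], [0, 1, 0]]

def Spec_move_queen (board : List (List Int)) (out : List (List Int)) : Prop := out = move_queen_alt board
instance (board : List (List Int)) (out : List (List Int)) : Decidable (Spec_move_queen board out) := by unfold Spec_move_queen; infer_instance

-- ===== CLAIM (what is proved, stated in full; the proofs are below) =====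
def Claim_equal_move_queen : Prop := ∀ (board : List (List Int)), Dom_move_queen board → Pre_move_queen board → Spec_move_queen board (move_queen board)

-- ===== LEMMAS AND PROOFS =====

theorem move_queen_witness_ok : Dom_move_queen pvWitness_move_queen ∧ Pre_move_queen pvWitness_move_queen := by
  constructor <;> decide
def ind (b : List (List Int)) (p q : Nat) : Int := if (b.getD p []).getD q 0 = 1 then 1 else 0
def crow (b : List (List Int)) (i : Nat) : Int := ∑ q ∈ Finset.range b.length, ind b i q
def ccol (b : List (List Int)) (j : Nat) : Int := ∑ p ∈ Finset.range b.length, ind b p j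
def cdg (b : List (List Int)) (i j : Nat) : Int :=
  ∑ p ∈ Finset.range b.length, ∑ q ∈ Finset.range b.length, if p + j = i + q then ind b p q else 0
def cad (b : List (List Int)) (i j : Nat) : Int :=
  ∑ p ∈ Finset.range b.length, ∑ q ∈ Finset.range b.length, if p + q = i + j then ind b p q else 0

lemma length_setCell (b : List (List Int)) (i j : Nat) (v : Int) : (setCell b i j v).length = b.length := by
  simp [setCell]

lemma ind_setCell (b : List (List Int)) (i j : Nat) (hi : i < b.length) (hj : j < b.length)
    (hr : ∀ r ∈ b, b.length ≤ r.length) (v : Int) (p q : Nat) :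
    ind (setCell b i j v) p q = ind b p q + (if p = i ∧ q = j then (if v = 1 then 1 else 0) - ind b i j else 0) := by
  have hrow : j < (b[i]?.getD []).length := by
    rw [List.getElem?_eq_getElem hi, Option.getD_some]
    exact lt_of_lt_of_le hj (hr _ (List.getElem_mem hi))
  unfold ind setCell
  by_cases hp : p = i
  · by_cases hq : q = j
    · subst hp; subst hq
      simp only [List.getD_eq_getElem?_getD, List.getElem?_set, if_pos rfl, if_pos hi,
        Option.getD_some, if_pos (And.intro rfl rfl), if_pos hrow]
      by_cases hv : v = 1 <;> by_cases ho : (b[p]?.getD [])[q]?.getD 0 = 1 <;>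
        simp [hv, ho, List.getElem?_set, hrow]
    · subst hp
      have hq' : ¬ j = q := fun h => hq h.symm
      simp [List.getD_eq_getElem?_getD, List.getElem?_set, hq', hq, hi]
  · have hp' : ¬ i = p := fun h => hp h.symm
    simp [List.getD_eq_getElem?_getD, List.getElem?_set, hp', hp]

lemma crow_setCell (b : List (List Int)) (i j : Nat) (hi : i < b.length) (hj : j < b.length)
    (hr : ∀ r ∈ b, b.length ≤ r.length) (v : Int) (p : Nat) :
    crow (setCell b i j v) p = crow b p + (if p = i then (if v = 1 then 1 else 0) - ind b i j else 0) := by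
  unfold crow
  rw [length_setCell]
  rw [Finset.sum_congr rfl (fun q _ => ind_setCell b i j hi hj hr v p q), Finset.sum_add_distrib]
  congr 1
  by_cases hp : p = i
  · subst hp
    rw [if_pos rfl]
    have : ∀ q ∈ Finset.range b.length, (if p = p ∧ q = j then (if v = 1 then (1:Int) else 0) - ind b p j else 0)
        = (if q = j then (if v = 1 then (1:Int) else 0) - ind b p j else 0) := by
      intro q _; by_cases hq : q = j <;> simp [hq]
    rw [Finset.sum_congr rfl this, Finset.sum_ite_eq' (Finset.range b.length) j]
    simp [Finset.mem_range.mpr hj]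
  · rw [if_neg hp]
    apply Finset.sum_eq_zero
    intro q _
    rw [if_neg (by omega : ¬ (p = i ∧ q = j))]

lemma ccol_setCell (b : List (List Int)) (i j : Nat) (hi : i < b.length) (hj : j < b.length)
    (hr : ∀ r ∈ b, b.length ≤ r.length) (v : Int) (q : Nat) :
    ccol (setCell b i j v) q = ccol b q + (if q = j then (if v = 1 then 1 else 0) - ind b i j else 0) := by
  unfold ccol
  rw [length_setCell]
  rw [Finset.sum_congr rfl (fun p _ => ind_setCell b i j hi hj hr v p q), Finset.sum_add_distrib]
  congr 1
  by_cases hq : q = j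
  · rw [if_pos hq]
    have : ∀ p ∈ Finset.range b.length, (if p = i ∧ q = j then (if v = 1 then (1:Int) else 0) - ind b i j else 0)
        = (if p = i then (if v = 1 then (1:Int) else 0) - ind b i j else 0) := by
      intro p _; by_cases hp : p = i <;> simp [hp, hq]
    rw [Finset.sum_congr rfl this, Finset.sum_ite_eq' (Finset.range b.length) i]
    simp [Finset.mem_range.mpr hi]
  · rw [if_neg hq]
    apply Finset.sum_eq_zero
    intro p _
    rw [if_neg (by omega : ¬ (p = i ∧ q = j))]

lemma cdg_setCell (b : List (List Int)) (i j : Nat) (hi : i < b.length) (hj : j < b.length)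
    (hr : ∀ r ∈ b, b.length ≤ r.length) (v : Int) (p q : Nat) :
    cdg (setCell b i j v) p q = cdg b p q + (if i + q = p + j then (if v = 1 then 1 else 0) - ind b i j else 0) := by
  unfold cdg
  rw [length_setCell]
  have hpt : ∀ p' ∈ Finset.range b.length, ∀ q' ∈ Finset.range b.length,
      (if p' + q = p + q' then ind (setCell b i j v) p' q' else 0)
      = (if p' + q = p + q' then ind b p' q' else 0)
        + (if p' = i ∧ q' = j ∧ p' + q = p + q' then (if v = 1 then (1:Int) else 0) - ind b i j else 0) := by
    intro p' _ q' _
    rw [ind_setCell b i j hi hj hr v p' q']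
    by_cases h1 : p' + q = p + q' <;> by_cases h2 : p' = i ∧ q' = j <;>
      simp [h1, h2] <;> omega
  calc (∑ p' ∈ Finset.range b.length, ∑ q' ∈ Finset.range b.length, if p' + q = p + q' then ind (setCell b i j v) p' q' else 0)
      = (∑ p' ∈ Finset.range b.length, ∑ q' ∈ Finset.range b.length, ((if p' + q = p + q' then ind b p' q' else 0)
        + (if p' = i ∧ q' = j ∧ p' + q = p + q' then (if v = 1 then (1:Int) else 0) - ind b i j else 0))) := by
        refine Finset.sum_congr rfl fun p' hp' => ?_
        refine Finset.sum_congr rfl fun q' hq' => ?_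
        exact hpt p' hp' q' hq'
    _ = cdg b p q + ∑ p' ∈ Finset.range b.length, ∑ q' ∈ Finset.range b.length,
          (if p' = i ∧ q' = j ∧ p' + q = p + q' then (if v = 1 then (1:Int) else 0) - ind b i j else 0) := by
        unfold cdg
        simp only [Finset.sum_add_distrib]
    _ = cdg b p q + (if i + q = p + j then (if v = 1 then 1 else 0) - ind b i j else 0) := by
        congr 1
        by_cases hc : i + q = p + j
        · rw [if_pos hc]
          have h1 : ∀ p' ∈ Finset.range b.length, (∑ q' ∈ Finset.range b.length,
              if p' = i ∧ q' = j ∧ p' + q = p + q' then (if v = 1 then (1:Int) else 0) - ind b i j else 0)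
              = (if p' = i then (if v = 1 then (1:Int) else 0) - ind b i j else 0) := by
            intro p' _
            by_cases hp' : p' = i
            · have h2 : ∀ q' ∈ Finset.range b.length, (if p' = i ∧ q' = j ∧ p' + q = p + q' then (if v = 1 then (1:Int) else 0) - ind b i j else 0)
                  = (if q' = j then (if v = 1 then (1:Int) else 0) - ind b i j else 0) := by
                intro q' _
                by_cases hq' : q' = j <;> simp [hp', hq'] <;> omega
              rw [Finset.sum_congr rfl h2, Finset.sum_ite_eq' (Finset.range b.length) j,
                if_pos (Finset.mem_range.mpr hj), if_pos hp']
            · rw [if_neg hp']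
              exact Finset.sum_eq_zero fun q' _ => if_neg (by tauto)
          rw [Finset.sum_congr rfl h1, Finset.sum_ite_eq' (Finset.range b.length) i,
            if_pos (Finset.mem_range.mpr hi)]
        · rw [if_neg hc]
          refine Finset.sum_eq_zero fun p' _ => Finset.sum_eq_zero fun q' _ => ?_
          exact if_neg (by omega)

lemma cad_setCell (b : List (List Int)) (i j : Nat) (hi : i < b.length) (hj : j < b.length)
    (hr : ∀ r ∈ b, b.length ≤ r.length) (v : Int) (p q : Nat) :
    cad (setCell b i j v) p q = cad b p q + (if i + j = p + q then (if v = 1 then 1 else 0) - ind b i j else 0) := by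
  unfold cad
  rw [length_setCell]
  have hpt : ∀ p' ∈ Finset.range b.length, ∀ q' ∈ Finset.range b.length,
      (if p' + q' = p + q then ind (setCell b i j v) p' q' else 0)
      = (if p' + q' = p + q then ind b p' q' else 0)
        + (if p' = i ∧ q' = j ∧ p' + q' = p + q then (if v = 1 then (1:Int) else 0) - ind b i j else 0) := by
    intro p' _ q' _
    rw [ind_setCell b i j hi hj hr v p' q']
    by_cases h1 : p' + q' = p + q <;> by_cases h2 : p' = i ∧ q' = j <;>
      simp [h1, h2] <;> omega
  calc (∑ p' ∈ Finset.range b.length, ∑ q' ∈ Finset.range b.length, if p' + q' = p + q then ind (setCell b i j v) p' q' else 0)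
      = (∑ p' ∈ Finset.range b.length, ∑ q' ∈ Finset.range b.length, ((if p' + q' = p + q then ind b p' q' else 0)
        + (if p' = i ∧ q' = j ∧ p' + q' = p + q then (if v = 1 then (1:Int) else 0) - ind b i j else 0))) := by
        refine Finset.sum_congr rfl fun p' hp' => ?_
        refine Finset.sum_congr rfl fun q' hq' => ?_
        exact hpt p' hp' q' hq'
    _ = cad b p q + ∑ p' ∈ Finset.range b.length, ∑ q' ∈ Finset.range b.length,
          (if p' = i ∧ q' = j ∧ p' + q' = p + q then (if v = 1 then (1:Int) else 0) - ind b i j else 0) := by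
        unfold cad
        simp only [Finset.sum_add_distrib]
    _ = cad b p q + (if i + j = p + q then (if v = 1 then 1 else 0) - ind b i j else 0) := by
        congr 1
        by_cases hc : i + j = p + q
        · rw [if_pos hc]
          have h1 : ∀ p' ∈ Finset.range b.length, (∑ q' ∈ Finset.range b.length,
              if p' = i ∧ q' = j ∧ p' + q' = p + q then (if v = 1 then (1:Int) else 0) - ind b i j else 0)
              = (if p' = i then (if v = 1 then (1:Int) else 0) - ind b i j else 0) := by
            intro p' _
            by_cases hp' : p' = i
            · have h2 : ∀ q' ∈ Finset.range b.length, (if p' = i ∧ q' = j ∧ p' + q' = p + q then (if v = 1 then (1:Int) else 0) - ind b i j else 0)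
                  = (if q' = j then (if v = 1 then (1:Int) else 0) - ind b i j else 0) := by
                intro q' _
                by_cases hq' : q' = j <;> simp [hp', hq'] <;> omega
              rw [Finset.sum_congr rfl h2, Finset.sum_ite_eq' (Finset.range b.length) j,
                if_pos (Finset.mem_range.mpr hj), if_pos hp']
            · rw [if_neg hp']
              exact Finset.sum_eq_zero fun q' _ => if_neg (by tauto)
          rw [Finset.sum_congr rfl h1, Finset.sum_ite_eq' (Finset.range b.length) i,
            if_pos (Finset.mem_range.mpr hi)]
        · rw [if_neg hc]
          refine Finset.sum_eq_zero fun p' _ => Finset.sum_eq_zero fun q' _ => ?_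
          exact if_neg (by omega)

lemma rows_setCell (b : List (List Int)) (i j : Nat) (v : Int) (hi : i < b.length)
    (hr : ∀ r ∈ b, b.length ≤ r.length) : ∀ r ∈ setCell b i j v, (setCell b i j v).length ≤ r.length := by
  intro r hmem
  rw [length_setCell]
  rcases List.mem_or_eq_of_mem_set hmem with h | h
  · exact hr r h
  · subst h
    rw [List.length_set, List.getD_eq_getElem?_getD, List.getElem?_eq_getElem hi, Option.getD_some]
    exact hr _ (List.getElem_mem hi)

lemma sum_mul_ind (s : Finset ℕ) (a : ℕ) (f : ℕ → ℤ) (ha : a ∈ s) :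
    (∑ x ∈ s, f x * (if x = a then 1 else 0)) = f a := by
  have : ∀ x ∈ s, f x * (if x = a then (1:ℤ) else 0) = if x = a then f x else 0 := by
    intro x _; by_cases hx : x = a <;> simp [hx]
  rw [Finset.sum_congr rfl this, Finset.sum_ite_eq' s a, if_pos ha]

def alq (b : List (List Int)) (i j : Nat) : Int :=
  (crow b i - ind b i j) + (ccol b j - ind b i j) + (cdg b i j - ind b i j) + (cad b i j - ind b i j)
def attP (b : List (List Int)) : Int :=
  ∑ i ∈ Finset.range b.length, ∑ j ∈ Finset.range b.length, ind b i j * alq b i j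

lemma attP_add (b : List (List Int)) (i j : Nat) (hi : i < b.length) (hj : j < b.length)
    (hr : ∀ r ∈ b, b.length ≤ r.length) (h0 : ind b i j = 0) :
    attP (setCell b i j 1) = attP b + 2 * (crow b i + ccol b j + cdg b i j + cad b i j) := by
  have halq : ∀ i' j', alq (setCell b i j 1) i' j' = alq b i' j'
      + (((if i' = i then (1:ℤ) else 0) + (if j' = j then 1 else 0)
        + (if i + j' = i' + j then 1 else 0) + (if i + j = i' + j' then 1 else 0))
        - 4 * (if i' = i ∧ j' = j then 1 else 0)) := by
    intro i' j'
    unfold alq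
    rw [crow_setCell b i j hi hj hr 1 i', ccol_setCell b i j hi hj hr 1 j',
      cdg_setCell b i j hi hj hr 1 i' j', cad_setCell b i j hi hj hr 1 i' j',
      ind_setCell b i j hi hj hr 1 i' j', h0]
    by_cases h1 : i' = i <;> by_cases h2 : j' = j <;> simp [h1, h2] <;> ring
  have hpt : ∀ i' j', ind (setCell b i j 1) i' j' * alq (setCell b i j 1) i' j'
      = ind b i' j' * alq b i' j'
        + ind b i' j' * (if i' = i then 1 else 0) + ind b i' j' * (if j' = j then 1 else 0)
        + ind b i' j' * (if i + j' = i' + j then 1 else 0) + ind b i' j' * (if i + j = i' + j' then 1 else 0)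
        - 4 * (if i' = i ∧ j' = j then ind b i' j' else 0)
        + (if i' = i ∧ j' = j then alq b i' j' else 0) := by
    intro i' j'
    rw [halq i' j', ind_setCell b i j hi hj hr 1 i' j', h0]
    by_cases hpair : i' = i ∧ j' = j
    · obtain ⟨h1, h2⟩ := hpair
      subst h1; subst h2
      simp
      ring
    · rw [if_neg hpair, if_neg hpair, if_neg hpair, if_neg hpair]
      ring
  unfold attP
  rw [length_setCell]
  rw [Finset.sum_congr rfl fun i' _ => Finset.sum_congr rfl fun j' _ => hpt i' j']
  simp only [Finset.sum_add_distrib, Finset.sum_sub_distrib]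
  have e1 : (∑ i' ∈ Finset.range b.length, ∑ j' ∈ Finset.range b.length,
      ind b i' j' * (if i' = i then (1:ℤ) else 0)) = crow b i := by
    have : ∀ i' ∈ Finset.range b.length, (∑ j' ∈ Finset.range b.length, ind b i' j' * (if i' = i then (1:ℤ) else 0))
        = (∑ j' ∈ Finset.range b.length, ind b i' j') * (if i' = i then 1 else 0) := by
      intro i' _; rw [Finset.sum_mul]
    rw [Finset.sum_congr rfl this, sum_mul_ind _ i _ (Finset.mem_range.mpr hi)]
    rfl
  have e2 : (∑ i' ∈ Finset.range b.length, ∑ j' ∈ Finset.range b.length,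
      ind b i' j' * (if j' = j then (1:ℤ) else 0)) = ccol b j := by
    have : ∀ i' ∈ Finset.range b.length, (∑ j' ∈ Finset.range b.length, ind b i' j' * (if j' = j then (1:ℤ) else 0))
        = ind b i' j := by
      intro i' _; exact sum_mul_ind _ j _ (Finset.mem_range.mpr hj)
    rw [Finset.sum_congr rfl this]
    rfl
  have e3 : (∑ i' ∈ Finset.range b.length, ∑ j' ∈ Finset.range b.length,
      ind b i' j' * (if i + j' = i' + j then (1:ℤ) else 0)) = cdg b i j := by
    unfold cdg
    refine Finset.sum_congr rfl fun i' _ => Finset.sum_congr rfl fun j' _ => ?_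
    by_cases hc : i + j' = i' + j
    · rw [if_pos hc, if_pos (by omega), mul_one]
    · rw [if_neg hc, if_neg (by omega), mul_zero]
  have e4 : (∑ i' ∈ Finset.range b.length, ∑ j' ∈ Finset.range b.length,
      ind b i' j' * (if i + j = i' + j' then (1:ℤ) else 0)) = cad b i j := by
    unfold cad
    refine Finset.sum_congr rfl fun i' _ => Finset.sum_congr rfl fun j' _ => ?_
    by_cases hc : i + j = i' + j'
    · rw [if_pos hc, if_pos (by omega), mul_one]
    · rw [if_neg hc, if_neg (by omega), mul_zero]
  have epair : ∀ (g : ℕ → ℕ → ℤ), (∑ i' ∈ Finset.range b.length, ∑ j' ∈ Finset.range b.length,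
      (if i' = i ∧ j' = j then g i' j' else 0)) = g i j := by
    intro g
    have hrow : ∀ i' ∈ Finset.range b.length, (∑ j' ∈ Finset.range b.length,
        (if i' = i ∧ j' = j then g i' j' else 0)) = (if i' = i then g i' j else 0) := by
      intro i' _
      by_cases hp : i' = i
      · have : ∀ j' ∈ Finset.range b.length, (if i' = i ∧ j' = j then g i' j' else 0)
            = (if j' = j then g i' j' else 0) := by
          intro j' _; by_cases hq : j' = j <;> simp [hp, hq]
        rw [Finset.sum_congr rfl this, Finset.sum_ite_eq' (Finset.range b.length) j,
          if_pos (Finset.mem_range.mpr hj), if_pos hp]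
      · rw [if_neg hp]
        exact Finset.sum_eq_zero fun j' _ => if_neg (by tauto)
    rw [Finset.sum_congr rfl hrow, Finset.sum_ite_eq' (Finset.range b.length) i,
      if_pos (Finset.mem_range.mpr hi)]
  have e5 : (∑ i' ∈ Finset.range b.length, ∑ j' ∈ Finset.range b.length,
      4 * (if i' = i ∧ j' = j then ind b i' j' else 0)) = 4 * ind b i j := by
    simp only [← Finset.mul_sum]
    rw [epair (fun i' j' => ind b i' j')]
  rw [e1, e2, e3, e4, e5, epair (fun i' j' => alq b i' j'), h0]
  have : alq b i j = crow b i + ccol b j + cdg b i j + cad b i j := by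
    unfold alq; rw [h0]; ring
  rw [this]
  ring

def wRow (b : List (List Int)) (i j : Nat) : Int :=
  ∑ k ∈ Finset.range b.length,
    ((if cell b i k = 1 ∧ k ≠ j then (1:Int) else 0) + (if cell b k j = 1 ∧ k ≠ i then (1:Int) else 0))
def wR1 (b : List (List Int)) (i j : Nat) : Int :=
  ∑ k ∈ Finset.range b.length,
    (if i + k + 1 < b.length ∧ j + k + 1 < b.length ∧ cell b (i+k+1) (j+k+1) = 1 then (1:Int) else 0)
def wR2 (b : List (List Int)) (i j : Nat) : Int :=
  ∑ k ∈ Finset.range b.length,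
    (if k + 1 ≤ i ∧ k + 1 ≤ j ∧ cell b (i-(k+1)) (j-(k+1)) = 1 then (1:Int) else 0)
def wR3 (b : List (List Int)) (i j : Nat) : Int :=
  ∑ k ∈ Finset.range b.length,
    (if k + 1 ≤ i ∧ j + k + 1 < b.length ∧ cell b (i-(k+1)) (j+k+1) = 1 then (1:Int) else 0)
def wR4 (b : List (List Int)) (i j : Nat) : Int :=
  ∑ k ∈ Finset.range b.length,
    (if i + k + 1 < b.length ∧ k + 1 ≤ j ∧ cell b (i+k+1) (j-(k+1)) = 1 then (1:Int) else 0)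
def wAll (b : List (List Int)) (i j : Nat) : Int :=
  wRow b i j + wR1 b i j + wR2 b i j + wR3 b i j + wR4 b i j

lemma foldl_if1 (N : Nat) (c : Nat → Prop) [DecidablePred c] (a : ℤ) :
    (List.range N).foldl (fun acc k => if c k then acc + 1 else acc) a
      = a + ∑ k ∈ Finset.range N, (if c k then (1:ℤ) else 0) := by
  have h : (fun (acc:ℤ) k => if c k then acc + 1 else acc)
      = fun acc k => acc + (if c k then (1:ℤ) else 0) := by
    funext acc k; by_cases hc : c k <;> simp [hc]
  rw [h, PySem.List.foldl_add]
  rfl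

lemma foldl_if2 (N : Nat) (c1 c2 : Nat → Prop) [DecidablePred c1] [DecidablePred c2] (a : ℤ) :
    (List.range N).foldl (fun acc k =>
      let acc := if c1 k then acc + 1 else acc
      if c2 k then acc + 1 else acc) a
      = a + ∑ k ∈ Finset.range N, ((if c1 k then (1:ℤ) else 0) + (if c2 k then (1:ℤ) else 0)) := by
  have h : (fun (acc:ℤ) k =>
      let acc := if c1 k then acc + 1 else acc
      if c2 k then acc + 1 else acc)
      = fun acc k => acc + ((if c1 k then (1:ℤ) else 0) + (if c2 k then (1:ℤ) else 0)) := by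
    funext acc k
    by_cases h1 : c1 k <;> by_cases h2 : c2 k <;> simp [h1, h2] <;> ring
  rw [h, PySem.List.foldl_add]
  rfl

lemma foldl_guard5 (N : Nat) (c : Nat → Prop) [DecidablePred c] (g1 g2 g3 g4 g5 : Nat → ℤ) (a : ℤ) :
    (List.range N).foldl (fun acc j => if c j then acc + g1 j + g2 j + g3 j + g4 j + g5 j else acc) a
      = a + ∑ j ∈ Finset.range N, (if c j then g1 j + g2 j + g3 j + g4 j + g5 j else 0) := by
  have h : (fun (acc:ℤ) j => if c j then acc + g1 j + g2 j + g3 j + g4 j + g5 j else acc)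
      = fun acc j => acc + (if c j then g1 j + g2 j + g3 j + g4 j + g5 j else 0) := by
    funext acc j; by_cases hc : c j <;> simp [hc] <;> ring
  rw [h, PySem.List.foldl_add]
  rfl

lemma calcAttacks_sum (b : List (List Int)) :
    calcAttacks b = ∑ i ∈ Finset.range b.length, ∑ j ∈ Finset.range b.length,
      if cell b i j = 1 then wAll b i j else 0 := by
  unfold calcAttacks
  simp only [foldl_if2, foldl_if1, foldl_guard5, PySem.List.foldl_add]
  simp only [wAll, wRow, wR1, wR2, wR3, wR4]
  rw [zero_add]
  rfl

lemma sum_range_restrict (N M : Nat) (h : M ≤ N) (f : Nat → ℤ) (hf : ∀ k, M ≤ k → f k = 0) :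
    ∑ k ∈ Finset.range N, f k = ∑ k ∈ Finset.range M, f k := by
  refine (Finset.sum_subset (by intro x hx; rw [Finset.mem_range] at hx ⊢; omega) ?_).symm
  intro x _ hx
  exact hf x (by simpa [Finset.mem_range] using hx)

lemma wRow_eq (b : List (List Int)) (i j : Nat) (hi : i < b.length) (hj : j < b.length)
    (hq : ind b i j = 1) : wRow b i j = (crow b i - 1) + (ccol b j - 1) := by
  unfold wRow
  rw [Finset.sum_add_distrib]
  have hr1 : ∀ k ∈ Finset.range b.length, (if cell b i k = 1 ∧ k ≠ j then (1:ℤ) else 0)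
      = ind b i k - (if k = j then ind b i k else 0) := by
    intro k _
    by_cases hk : k = j <;> by_cases ha : cell b i k = 1 <;> simp [ind, cell, hk, ha] at * <;> omega
  have hr2 : ∀ k ∈ Finset.range b.length, (if cell b k j = 1 ∧ k ≠ i then (1:ℤ) else 0)
      = ind b k j - (if k = i then ind b k j else 0) := by
    intro k _
    by_cases hk : k = i <;> by_cases ha : cell b k j = 1 <;> simp [ind, cell, hk, ha] at * <;> omega
  rw [Finset.sum_congr rfl hr1, Finset.sum_congr rfl hr2, Finset.sum_sub_distrib, Finset.sum_sub_distrib,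
    Finset.sum_ite_eq' (Finset.range b.length) j, Finset.sum_ite_eq' (Finset.range b.length) i,
    if_pos (Finset.mem_range.mpr hj), if_pos (Finset.mem_range.mpr hi), hq]
  rfl

lemma sum_dg_inner (b : List (List Int)) (i j p : Nat) :
    (∑ q ∈ Finset.range b.length, if p + j = i + q then ind b p q else 0)
      = if i ≤ p + j ∧ p + j - i < b.length then ind b p (p + j - i) else 0 := by
  by_cases h : i ≤ p + j ∧ p + j - i < b.length
  · rw [if_pos h, Finset.sum_eq_single_of_mem (p + j - i) (Finset.mem_range.mpr h.2)]
    · rw [if_pos (by omega)]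
    · intro q _ hqne; exact if_neg (by omega)
  · rw [if_neg h]
    refine Finset.sum_eq_zero fun q hq => if_neg ?_
    rw [Finset.mem_range] at hq; omega

lemma sum_ad_inner (b : List (List Int)) (i j p : Nat) :
    (∑ q ∈ Finset.range b.length, if p + q = i + j then ind b p q else 0)
      = if p ≤ i + j ∧ i + j - p < b.length then ind b p (i + j - p) else 0 := by
  by_cases h : p ≤ i + j ∧ i + j - p < b.length
  · rw [if_pos h, Finset.sum_eq_single_of_mem (i + j - p) (Finset.mem_range.mpr h.2)]
    · rw [if_pos (by omega)]
    · intro q _ hqne; exact if_neg (by omega)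
  · rw [if_neg h]
    refine Finset.sum_eq_zero fun q hq => if_neg ?_
    rw [Finset.mem_range] at hq; omega

lemma wDiag_eq (b : List (List Int)) (i j : Nat) (hi : i < b.length) (hj : j < b.length)
    (hq : ind b i j = 1) : wR1 b i j + wR2 b i j = cdg b i j - 1 := by
  have hG := fun p => sum_dg_inner b i j p
  have hcdg : cdg b i j = ∑ p ∈ Finset.range b.length,
      (if i ≤ p + j ∧ p + j - i < b.length then ind b p (p + j - i) else 0) := by
    unfold cdg; exact Finset.sum_congr rfl fun p _ => hG p
  -- split the column of the sum at p = i
  rw [hcdg, Finset.range_eq_Ico, ← Finset.sum_Ico_consecutive _ (Nat.zero_le i) (le_of_lt hi),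
    Finset.sum_eq_sum_Ico_succ_bot hi]
  have hGi : (if i ≤ i + j ∧ i + j - i < b.length then ind b i (i + j - i) else 0) = 1 := by
    rw [if_pos (by omega)]
    have : i + j - i = j := by omega
    rw [this, hq]
  -- upper part = wR1
  have hupper : wR1 b i j = ∑ p ∈ Finset.Ico (i+1) b.length,
      (if i ≤ p + j ∧ p + j - i < b.length then ind b p (p + j - i) else 0) := by
    rw [Finset.sum_Ico_eq_sum_range]
    unfold wR1
    rw [sum_range_restrict b.length (b.length - (i+1)) (by omega)
      (fun k => if i + k + 1 < b.length ∧ j + k + 1 < b.length ∧ cell b (i+k+1) (j+k+1) = 1 then (1:ℤ) else 0)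
      (fun k hk => if_neg (by omega))]
    refine Finset.sum_congr rfl fun k hk => ?_
    rw [Finset.mem_range] at hk
    have e1 : i + 1 + k = i + k + 1 := by ring
    rw [e1]
    have e2 : i + k + 1 + j - i = j + k + 1 := by omega
    rw [e2]
    by_cases hc : j + k + 1 < b.length
    · by_cases ha : cell b (i+k+1) (j+k+1) = 1 <;>
        simp [ind, cell, ha, hc, (by omega : i + k + 1 < b.length), (by omega : i ≤ i + k + 1 + j)]
    · rw [if_neg (by omega), if_neg (by omega)]
  -- lower part = wR2
  have hlower : wR2 b i j = ∑ p ∈ Finset.Ico 0 i,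
      (if i ≤ p + j ∧ p + j - i < b.length then ind b p (p + j - i) else 0) := by
    rw [← Finset.range_eq_Ico]
    unfold wR2
    rw [sum_range_restrict b.length i (le_of_lt hi)
      (fun k => if k + 1 ≤ i ∧ k + 1 ≤ j ∧ cell b (i-(k+1)) (j-(k+1)) = 1 then (1:ℤ) else 0)
      (fun k hk => if_neg (by omega))]
    conv_rhs => rw [← Finset.sum_range_reflect
      (fun p => if i ≤ p + j ∧ p + j - i < b.length then ind b p (p + j - i) else 0) i]
    refine Finset.sum_congr rfl fun k hk => ?_
    rw [Finset.mem_range] at hk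
    by_cases hcj : k + 1 ≤ j
    · have e1 : i - 1 - k = i - (k+1) := by omega
      rw [e1]
      have e2 : i - (k+1) + j - i = j - (k+1) := by omega
      rw [e2]
      by_cases ha : cell b (i-(k+1)) (j-(k+1)) = 1 <;>
        simp [ind, cell, ha, hcj, (by omega : k+1 ≤ i), (by omega : i ≤ i - (k+1) + j),
          (by omega : j - (k+1) < b.length)]
    · rw [if_neg (by omega), if_neg (by omega)]
  rw [hGi, ← hupper, ← hlower]
  ring

lemma wAnti_eq (b : List (List Int)) (i j : Nat) (hi : i < b.length) (hj : j < b.length)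
    (hq : ind b i j = 1) : wR3 b i j + wR4 b i j = cad b i j - 1 := by
  have hcad : cad b i j = ∑ p ∈ Finset.range b.length,
      (if p ≤ i + j ∧ i + j - p < b.length then ind b p (i + j - p) else 0) := by
    unfold cad; exact Finset.sum_congr rfl fun p _ => sum_ad_inner b i j p
  rw [hcad, Finset.range_eq_Ico, ← Finset.sum_Ico_consecutive _ (Nat.zero_le i) (le_of_lt hi),
    Finset.sum_eq_sum_Ico_succ_bot hi]
  have hGi : (if i ≤ i + j ∧ i + j - i < b.length then ind b i (i + j - i) else 0) = 1 := by
    rw [if_pos (by omega)]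
    have : i + j - i = j := by omega
    rw [this, hq]
  have hupper : wR4 b i j = ∑ p ∈ Finset.Ico (i+1) b.length,
      (if p ≤ i + j ∧ i + j - p < b.length then ind b p (i + j - p) else 0) := by
    rw [Finset.sum_Ico_eq_sum_range]
    unfold wR4
    rw [sum_range_restrict b.length (b.length - (i+1)) (by omega)
      (fun k => if i + k + 1 < b.length ∧ k + 1 ≤ j ∧ cell b (i+k+1) (j-(k+1)) = 1 then (1:ℤ) else 0)
      (fun k hk => if_neg (by omega))]
    refine Finset.sum_congr rfl fun k hk => ?_
    rw [Finset.mem_range] at hk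
    have e1 : i + 1 + k = i + k + 1 := by ring
    rw [e1]
    by_cases hcj : k + 1 ≤ j
    · have e2 : i + j - (i + k + 1) = j - (k+1) := by omega
      rw [e2]
      by_cases ha : cell b (i+k+1) (j-(k+1)) = 1 <;>
        simp [ind, cell, ha, hcj, (by omega : i + k + 1 < b.length), (by omega : i + k + 1 ≤ i + j),
          (by omega : j - (k+1) < b.length)]
    · rw [if_neg (by omega), if_neg (by omega)]
  have hlower : wR3 b i j = ∑ p ∈ Finset.Ico 0 i,
      (if p ≤ i + j ∧ i + j - p < b.length then ind b p (i + j - p) else 0) := by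
    rw [← Finset.range_eq_Ico]
    unfold wR3
    rw [sum_range_restrict b.length i (le_of_lt hi)
      (fun k => if k + 1 ≤ i ∧ j + k + 1 < b.length ∧ cell b (i-(k+1)) (j+k+1) = 1 then (1:ℤ) else 0)
      (fun k hk => if_neg (by omega))]
    conv_rhs => rw [← Finset.sum_range_reflect
      (fun p => if p ≤ i + j ∧ i + j - p < b.length then ind b p (i + j - p) else 0) i]
    refine Finset.sum_congr rfl fun k hk => ?_
    rw [Finset.mem_range] at hk
    by_cases hcn : j + k + 1 < b.length
    · have e1 : i - 1 - k = i - (k+1) := by omega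
      have e2 : i + j - (i - 1 - k) = j + k + 1 := by omega
      rw [e1]
      have e2' : i + j - (i - (k+1)) = j + k + 1 := by omega
      rw [e2']
      by_cases ha : cell b (i-(k+1)) (j+k+1) = 1 <;>
        simp [ind, cell, ha, hcn, (by omega : k+1 ≤ i), (by omega : i - (k+1) ≤ i + j)]
    · rw [if_neg (by omega), if_neg (by omega)]
  rw [hGi, ← hupper, ← hlower]
  ring

lemma calcAttacks_eq (b : List (List Int)) : calcAttacks b = attP b := by
  rw [calcAttacks_sum]
  unfold attP
  refine Finset.sum_congr rfl fun i hi => Finset.sum_congr rfl fun j hj => ?_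
  rw [Finset.mem_range] at hi hj
  by_cases hq : cell b i j = 1
  · have hq1 : ind b i j = 1 := by simp [ind, cell] at *; omega
    rw [if_pos hq, hq1, one_mul]
    unfold wAll
    rw [wRow_eq b i j hi hj hq1]
    have hd := wDiag_eq b i j hi hj hq1
    have ha := wAnti_eq b i j hi hj hq1
    unfold alq
    rw [hq1]
    omega
  · have hq0 : ind b i j = 0 := by simp [ind, cell] at *; omega
    rw [if_neg hq, hq0, zero_mul]

lemma crow_congr (b1 b2 : List (List Int)) (hlen : b1.length = b2.length)
    (hpt : ∀ p q, ind b1 p q = ind b2 p q) : ∀ i, crow b1 i = crow b2 i := by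
  intro i; unfold crow; rw [hlen]; exact Finset.sum_congr rfl fun q _ => hpt i q
lemma ccol_congr (b1 b2 : List (List Int)) (hlen : b1.length = b2.length)
    (hpt : ∀ p q, ind b1 p q = ind b2 p q) : ∀ j, ccol b1 j = ccol b2 j := by
  intro j; unfold ccol; rw [hlen]; exact Finset.sum_congr rfl fun p _ => hpt p j
lemma cdg_congr (b1 b2 : List (List Int)) (hlen : b1.length = b2.length)
    (hpt : ∀ p q, ind b1 p q = ind b2 p q) : ∀ i j, cdg b1 i j = cdg b2 i j := by
  intro i j; unfold cdg; rw [hlen]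
  refine Finset.sum_congr rfl fun p _ => Finset.sum_congr rfl fun q _ => ?_
  rw [hpt p q]
lemma cad_congr (b1 b2 : List (List Int)) (hlen : b1.length = b2.length)
    (hpt : ∀ p q, ind b1 p q = ind b2 p q) : ∀ i j, cad b1 i j = cad b2 i j := by
  intro i j; unfold cad; rw [hlen]
  refine Finset.sum_congr rfl fun p _ => Finset.sum_congr rfl fun q _ => ?_
  rw [hpt p q]
lemma alq_congr (b1 b2 : List (List Int)) (hlen : b1.length = b2.length)
    (hpt : ∀ p q, ind b1 p q = ind b2 p q) : ∀ i j, alq b1 i j = alq b2 i j := by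
  intro i j; unfold alq
  rw [crow_congr b1 b2 hlen hpt, ccol_congr b1 b2 hlen hpt, cdg_congr b1 b2 hlen hpt,
    cad_congr b1 b2 hlen hpt, hpt]
lemma attP_congr (b1 b2 : List (List Int)) (hlen : b1.length = b2.length)
    (hpt : ∀ p q, ind b1 p q = ind b2 p q) : attP b1 = attP b2 := by
  unfold attP; rw [hlen]
  refine Finset.sum_congr rfl fun p _ => Finset.sum_congr rfl fun q _ => ?_
  rw [hpt p q, alq_congr b1 b2 hlen hpt]

-- writing a non-queen value over a queen: the inverse of attP_add
lemma attP_remove (b : List (List Int)) (i j : Nat) (hi : i < b.length) (hj : j < b.length)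
    (hr : ∀ r ∈ b, b.length ≤ r.length) (h1 : ind b i j = 1) (v : Int) (hv : v ≠ 1) :
    attP b = attP (setCell b i j v)
      + 2 * (crow (setCell b i j v) i + ccol (setCell b i j v) j + cdg (setCell b i j v) i j + cad (setCell b i j v) i j) := by
  set b' := setCell b i j v with hb'
  have hlen : b'.length = b.length := length_setCell b i j v
  have hr' : ∀ r ∈ b', b'.length ≤ r.length := rows_setCell b i j v hi hr
  have hi' : i < b'.length := by omega
  have hj' : j < b'.length := by omega
  have h0 : ind b' i j = 0 := by
    rw [hb', ind_setCell b i j hi hj hr v i j, if_pos ⟨rfl, rfl⟩, if_neg hv, h1]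
    ring
  have hpt : ∀ p q, ind (setCell b' i j 1) p q = ind b p q := by
    intro p q
    rw [ind_setCell b' i j hi' hj' hr' 1 p q, h0, hb', ind_setCell b i j hi hj hr v p q]
    by_cases hc : p = i ∧ q = j
    · rw [if_pos hc, if_pos hc]
      obtain ⟨hp, hq⟩ := hc; subst hp; subst hq
      rw [h1, if_neg hv]
      norm_num
    · rw [if_neg hc, if_neg hc]
      ring
  have := attP_add b' i j hi' hj' hr' h0
  rw [attP_congr (setCell b' i j 1) b (by rw [length_setCell, hlen]) hpt] at this
  omega

-- a write that does not change queen-ness leaves everything unchanged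
lemma ind_setCell_neutral (b : List (List Int)) (i j : Nat) (hi : i < b.length) (hj : j < b.length)
    (hr : ∀ r ∈ b, b.length ≤ r.length) (v : Int)
    (hneu : (if v = 1 then (1:ℤ) else 0) = ind b i j) :
    ∀ p q, ind (setCell b i j v) p q = ind b p q := by
  intro p q
  rw [ind_setCell b i j hi hj hr v p q, hneu]
  simp

lemma filter_map_sum (N : Nat) (p : Nat → Bool) (h : Nat → Int) :
    ((((List.range N).filter p).map h).sum) = ∑ k ∈ Finset.range N, if p k then h k else 0 := by
  induction N with
  | zero => simp
  | succ n ih =>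
      rw [List.range_succ, List.filter_append, List.map_append, List.sum_append, ih,
        Finset.sum_range_succ]
      by_cases hp : p n <;> simp [hp]

lemma count_cast {α : Type} [DecidableEq α] (l : List α) (v : α) :
    ((l.count v : Nat) : Int) = (l.map (fun x => if x = v then (1:Int) else 0)).sum := by
  induction l with
  | nil => simp
  | cons x xs ih =>
      rw [List.count_cons, List.map_cons, List.sum_cons, ← ih]
      by_cases hx : x = v <;> simp [hx] <;> ring

lemma foldl_sim {α β γ : Type} (R : α → β → Prop) (f : α → γ → α) (g : β → γ → β) (l : List γ)
    (h : ∀ a b x, x ∈ l → R a b → R (f a x) (g b x)) :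
    ∀ a b, R a b → R (l.foldl f a) (l.foldl g b) := by
  induction l with
  | nil => intro a b hr; simpa using hr
  | cons x xs ih =>
      intro a b hr
      simp only [List.foldl_cons]
      exact ih (fun a b y hy => h a b y (List.mem_cons_of_mem _ hy)) _ _ (h a b x List.mem_cons_self hr)

lemma sum_map_flatMap {α β : Type} (l : List α) (f : α → List β) (h : β → ℤ) :
    ((l.flatMap f).map h).sum = (l.map (fun x => ((f x).map h).sum)).sum := by
  induction l with
  | nil => rfl
  | cons x xs ih => simp [List.flatMap_cons, ih]

lemma sum_map_queensOf (b : List (List Int)) (N : Nat) (h : Nat × Nat → Int) :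
    ((queensOf b N).map h).sum
      = ∑ i ∈ Finset.range N, ∑ j ∈ Finset.range N, if cell b i j = 1 then h (i, j) else 0 := by
  unfold queensOf
  rw [sum_map_flatMap]
  have hrow : ∀ i ∈ List.range N,
      ((((List.range N).filter (fun j => cell b i j = 1)).map (fun j => (i, j))).map h).sum
      = ∑ j ∈ Finset.range N, if cell b i j = 1 then h (i, j) else 0 := by
    intro i _
    rw [List.map_map, filter_map_sum]
    simp
  rw [List.map_congr_left hrow]
  rfl

lemma foldl_counts (qs : List (Nat × Nat)) (d1 d2 d3 d4 : PySem.Dict Int Int) :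
    qs.foldl (fun (c : PySem.Dict Int Int × PySem.Dict Int Int × PySem.Dict Int Int × PySem.Dict Int Int) q =>
      (c.1.modify (q.1 : Int) 0 (· + 1), c.2.1.modify (q.2 : Int) 0 (· + 1),
       c.2.2.1.modify ((q.1 : Int) - (q.2 : Int)) 0 (· + 1), c.2.2.2.modify ((q.1 : Int) + (q.2 : Int)) 0 (· + 1)))
      (d1, d2, d3, d4)
    = (qs.foldl (fun d q => d.modify (q.1 : Int) 0 (· + 1)) d1,
       qs.foldl (fun d q => d.modify (q.2 : Int) 0 (· + 1)) d2,
       qs.foldl (fun d q => d.modify ((q.1 : Int) - (q.2 : Int)) 0 (· + 1)) d3,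
       qs.foldl (fun d q => d.modify ((q.1 : Int) + (q.2 : Int)) 0 (· + 1)) d4) := by
  induction qs generalizing d1 d2 d3 d4 with
  | nil => rfl
  | cons q qs ih => simp only [List.foldl_cons]; rw [ih]

lemma dictCount_getD (qs : List (Nat × Nat)) (key : Nat × Nat → Int) (v : Int) :
    (qs.foldl (fun d q => d.modify (key q) 0 (· + 1)) (PySem.Dict.empty : PySem.Dict Int Int)).getD v 0
      = ((qs.map key).count v : Int) := by
  rw [← List.foldl_map (f := key) (g := fun (d : PySem.Dict Int Int) (x : Int) => d.modify x 0 (· + 1))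
    (l := qs) (init := PySem.Dict.empty), PySem.Dict.getD_foldl_modify_add_one]
  simp

-- ---- dict characterizations ----

lemma rowD_getD (b : List (List Int)) (i0 : Nat) (h0 : i0 < b.length) :
    ((queensOf b b.length).foldl (fun d q => d.modify (q.1 : Int) 0 (· + 1)) PySem.Dict.empty).getD (i0 : Int) 0
      = crow b i0 := by
  rw [dictCount_getD, count_cast, List.map_map, sum_map_queensOf]
  unfold crow
  have hpt : ∀ i ∈ Finset.range b.length, (∑ j ∈ Finset.range b.length,
      if cell b i j = 1 then ((fun x => if x = (i0:Int) then (1:ℤ) else 0) ∘ (fun q : Nat × Nat => (q.1 : Int))) (i, j) else 0)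
      = if i = i0 then (∑ j ∈ Finset.range b.length, ind b i j) else 0 := by
    intro i _
    by_cases hc : i = i0
    · rw [if_pos hc]
      refine Finset.sum_congr rfl fun j _ => ?_
      by_cases hb : cell b i j = 1 <;> simp [ind, cell, hb, Function.comp, hc]
    · rw [if_neg hc]
      refine Finset.sum_eq_zero fun j _ => ?_
      by_cases hb : cell b i j = 1 <;>
        simp [Function.comp, hb, hc, (fun h => hc (Int.natCast_inj.mp h) : ¬ (i:Int) = (i0:Int))]
  rw [Finset.sum_congr rfl hpt, Finset.sum_ite_eq' (Finset.range b.length) i0, if_pos (Finset.mem_range.mpr h0)]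

lemma colD_getD (b : List (List Int)) (j0 : Nat) (h0 : j0 < b.length) :
    ((queensOf b b.length).foldl (fun d q => d.modify (q.2 : Int) 0 (· + 1)) PySem.Dict.empty).getD (j0 : Int) 0
      = ccol b j0 := by
  rw [dictCount_getD, count_cast, List.map_map, sum_map_queensOf]
  unfold ccol
  have hpt : ∀ i ∈ Finset.range b.length, (∑ j ∈ Finset.range b.length,
      if cell b i j = 1 then ((fun x => if x = (j0:Int) then (1:ℤ) else 0) ∘ (fun q : Nat × Nat => (q.2 : Int))) (i, j) else 0)
      = ind b i j0 := by
    intro i _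
    have : ∀ j ∈ Finset.range b.length, (if cell b i j = 1 then ((fun x => if x = (j0:Int) then (1:ℤ) else 0) ∘ (fun q : Nat × Nat => (q.2 : Int))) (i, j) else 0)
        = if j = j0 then ind b i j else 0 := by
      intro j _
      by_cases hc : j = j0 <;> by_cases hb : cell b i j = 1 <;>
        simp [ind, cell, hb, hc, Function.comp] <;> omega
    rw [Finset.sum_congr rfl this, Finset.sum_ite_eq' (Finset.range b.length) j0, if_pos (Finset.mem_range.mpr h0)]
  exact Finset.sum_congr rfl hpt

lemma dgD_getD (b : List (List Int)) (i0 j0 : Nat) (hi0 : i0 < b.length) (hj0 : j0 < b.length) :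
    ((queensOf b b.length).foldl (fun d q => d.modify ((q.1 : Int) - (q.2 : Int)) 0 (· + 1)) PySem.Dict.empty).getD ((i0 : Int) - (j0 : Int)) 0
      = cdg b i0 j0 := by
  rw [dictCount_getD, count_cast, List.map_map, sum_map_queensOf]
  unfold cdg
  refine Finset.sum_congr rfl fun i _ => Finset.sum_congr rfl fun j _ => ?_
  by_cases hc : i + j0 = i0 + j
  · have hcast : ((i:Int) - (j:Int)) = ((i0:Int) - (j0:Int)) := by omega
    by_cases hb : cell b i j = 1 <;> simp [ind, cell, hb, hc, hcast, Function.comp]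
  · have hcast : ¬ ((i:Int) - (j:Int)) = ((i0:Int) - (j0:Int)) := by omega
    by_cases hb : cell b i j = 1 <;> simp [ind, cell, hb, hc, hcast, Function.comp]

lemma adD_getD (b : List (List Int)) (i0 j0 : Nat) (hi0 : i0 < b.length) (hj0 : j0 < b.length) :
    ((queensOf b b.length).foldl (fun d q => d.modify ((q.1 : Int) + (q.2 : Int)) 0 (· + 1)) PySem.Dict.empty).getD ((i0 : Int) + (j0 : Int)) 0
      = cad b i0 j0 := by
  rw [dictCount_getD, count_cast, List.map_map, sum_map_queensOf]
  unfold cad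
  refine Finset.sum_congr rfl fun i _ => Finset.sum_congr rfl fun j _ => ?_
  by_cases hc : i + j = i0 + j0
  · have hcast : ((i:Int) + (j:Int)) = ((i0:Int) + (j0:Int)) := by omega
    by_cases hb : cell b i j = 1 <;> simp [ind, cell, hb, hc, hcast, Function.comp]
  · have hcast : ¬ ((i:Int) + (j:Int)) = ((i0:Int) + (j0:Int)) := by omega
    by_cases hb : cell b i j = 1 <;> simp [ind, cell, hb, hc, hcast, Function.comp]

lemma mem_queensOf (b : List (List Int)) (N : Nat) (q : Nat × Nat) :
    q ∈ queensOf b N ↔ q.1 < N ∧ q.2 < N ∧ cell b q.1 q.2 = 1 := by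
  obtain ⟨i, j⟩ := q
  simp only [queensOf, List.mem_flatMap, List.mem_map, List.mem_filter, List.mem_range]
  constructor
  · rintro ⟨i', hi', j', ⟨⟨hj', hb⟩, hpair⟩⟩
    cases hpair
    exact ⟨hi', hj', by simpa using hb⟩
  · rintro ⟨hi, hj, hb⟩
    exact ⟨i, hi, j, ⟨⟨hj, by simpa using hb⟩, rfl⟩⟩

-- ---- the two ports' loop bodies (as they appear in the final file) ----

-- ---- the simulation invariant ----

def GoodB (N : Nat) (s : StB) : Prop :=
  s.cur.length = N ∧ (∀ r ∈ s.cur, N ≤ r.length) ∧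
  (∀ i < N, s.row.getD (i : Int) 0 = crow s.cur i) ∧
  (∀ j < N, s.col.getD (j : Int) 0 = ccol s.cur j) ∧
  (∀ i < N, ∀ j < N, s.dg.getD ((i : Int) - (j : Int)) 0 = cdg s.cur i j) ∧
  (∀ i < N, ∀ j < N, s.ad.getD ((i : Int) + (j : Int)) 0 = cad s.cur i j) ∧
  s.T = attP s.cur

def Sim (N : Nat) (a : StA) (s : StB) : Prop :=
  a.cur = s.cur ∧ a.ba = s.best ∧ a.bb = s.bb ∧ a.mv = s.mv ∧ GoodB N s

lemma cdg_skew (b : List (List Int)) {i j i1 j1 : Nat} (h : i + j1 = i1 + j) : cdg b i j = cdg b i1 j1 := by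
  unfold cdg
  refine Finset.sum_congr rfl fun p _ => Finset.sum_congr rfl fun q _ => ?_
  by_cases hc : p + j = i + q
  · rw [if_pos hc, if_pos (by omega)]
  · rw [if_neg hc, if_neg (by omega)]

lemma cad_skew (b : List (List Int)) {i j i1 j1 : Nat} (h : i + j = i1 + j1) : cad b i j = cad b i1 j1 := by
  unfold cad
  refine Finset.sum_congr rfl fun p _ => Finset.sum_congr rfl fun q _ => ?_
  by_cases hc : p + q = i + j
  · rw [if_pos hc, if_pos (by omega)]
  · rw [if_neg hc, if_neg (by omega)]

lemma bPut_sim (N : Nat) (s : StB) (h : GoodB N s) (i j : Nat) (hi : i < N) (hj : j < N) (v : Int) :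
    (bPut s i j v).cur = setCell s.cur i j v ∧ GoodB N (bPut s i j v) ∧
    (bPut s i j v).best = s.best ∧ (bPut s i j v).bb = s.bb ∧ (bPut s i j v).mv = s.mv := by
  obtain ⟨hlen, hrows, hrow, hcol, hdg, had, hT⟩ := h
  have hi' : i < s.cur.length := by omega
  have hj' : j < s.cur.length := by omega
  have hrows0 : ∀ r ∈ s.cur, s.cur.length ≤ r.length := by
    intro r hr; have := hrows r hr; omega
  have hlen' : (setCell s.cur i j v).length = N := by rw [length_setCell]; exact hlen
  have hrows' : ∀ r ∈ setCell s.cur i j v, N ≤ r.length := by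
    intro r hrmem
    have := rows_setCell s.cur i j v hi' hrows0 r hrmem
    omega
  unfold bPut
  dsimp only
  split_ifs with hrem hadd
  -- removal: a queen disappears from (i, j)
  · obtain ⟨hold, hv⟩ := hrem
    have hind1 : ind s.cur i j = 1 := by simp [ind, cell] at *; omega
    have hvv : (if v = 1 then (1:ℤ) else 0) = 0 := by rw [if_neg hv]
    have hcrow' : ∀ i1, crow (setCell s.cur i j v) i1 = crow s.cur i1 + (if i1 = i then -1 else 0) := by
      intro i1
      rw [crow_setCell s.cur i j hi' hj' hrows0 v i1, hvv, hind1]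
      by_cases hc : i1 = i <;> simp [hc]
    have hccol' : ∀ j1, ccol (setCell s.cur i j v) j1 = ccol s.cur j1 + (if j1 = j then -1 else 0) := by
      intro j1
      rw [ccol_setCell s.cur i j hi' hj' hrows0 v j1, hvv, hind1]
      by_cases hc : j1 = j <;> simp [hc]
    have hcdg' : ∀ i1 j1, cdg (setCell s.cur i j v) i1 j1 = cdg s.cur i1 j1 + (if i + j1 = i1 + j then -1 else 0) := by
      intro i1 j1
      rw [cdg_setCell s.cur i j hi' hj' hrows0 v i1 j1, hvv, hind1]
      by_cases hc : i + j1 = i1 + j <;> simp [hc]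
    have hcad' : ∀ i1 j1, cad (setCell s.cur i j v) i1 j1 = cad s.cur i1 j1 + (if i + j = i1 + j1 then -1 else 0) := by
      intro i1 j1
      rw [cad_setCell s.cur i j hi' hj' hrows0 v i1 j1, hvv, hind1]
      by_cases hc : i + j = i1 + j1 <;> simp [hc]
    have hrow' : ∀ i1 < N, (s.row.modify (i:Int) 0 (· - 1)).getD (i1:Int) 0 = crow (setCell s.cur i j v) i1 := by
      intro i1 h1
      rw [PySem.Dict.getD_modify, hcrow' i1]
      by_cases hc : i1 = i
      · subst hc; rw [if_pos rfl, hrow i1 hi, if_pos rfl]; ring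
      · rw [if_neg (by omega : ¬ (i1:Int) = (i:Int)), hrow i1 h1, if_neg hc]; ring
    have hcol' : ∀ j1 < N, (s.col.modify (j:Int) 0 (· - 1)).getD (j1:Int) 0 = ccol (setCell s.cur i j v) j1 := by
      intro j1 h1
      rw [PySem.Dict.getD_modify, hccol' j1]
      by_cases hc : j1 = j
      · subst hc; rw [if_pos rfl, hcol j1 hj, if_pos rfl]; ring
      · rw [if_neg (by omega : ¬ (j1:Int) = (j:Int)), hcol j1 h1, if_neg hc]; ring
    have hdg' : ∀ i1 < N, ∀ j1 < N, (s.dg.modify ((i:Int)-(j:Int)) 0 (· - 1)).getD ((i1:Int)-(j1:Int)) 0 = cdg (setCell s.cur i j v) i1 j1 := by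
      intro i1 h1 j1 h2
      rw [PySem.Dict.getD_modify, hcdg' i1 j1]
      by_cases hc : i + j1 = i1 + j
      · rw [if_pos (by omega : (i1:Int)-(j1:Int) = (i:Int)-(j:Int)), hdg i hi j hj, if_pos hc,
          cdg_skew s.cur hc]; ring
      · rw [if_neg (by omega : ¬ (i1:Int)-(j1:Int) = (i:Int)-(j:Int)), hdg i1 h1 j1 h2, if_neg hc]; ring
    have had' : ∀ i1 < N, ∀ j1 < N, (s.ad.modify ((i:Int)+(j:Int)) 0 (· - 1)).getD ((i1:Int)+(j1:Int)) 0 = cad (setCell s.cur i j v) i1 j1 := by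
      intro i1 h1 j1 h2
      rw [PySem.Dict.getD_modify, hcad' i1 j1]
      by_cases hc : i + j = i1 + j1
      · rw [if_pos (by omega : (i1:Int)+(j1:Int) = (i:Int)+(j:Int)), had i hi j hj, if_pos hc,
          cad_skew s.cur hc]; ring
      · rw [if_neg (by omega : ¬ (i1:Int)+(j1:Int) = (i:Int)+(j:Int)), had i1 h1 j1 h2, if_neg hc]; ring
    have hTnew : s.T - 2 * ((s.row.modify (i:Int) 0 (· - 1)).getD (i:Int) 0 + (s.col.modify (j:Int) 0 (· - 1)).getD (j:Int) 0 +
          (s.dg.modify ((i:Int)-(j:Int)) 0 (· - 1)).getD ((i:Int)-(j:Int)) 0 + (s.ad.modify ((i:Int)+(j:Int)) 0 (· - 1)).getD ((i:Int)+(j:Int)) 0)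
        = attP (setCell s.cur i j v) := by
      rw [hrow' i hi, hcol' j hj, hdg' i hi j hj, had' i hi j hj]
      have hrm := attP_remove s.cur i j hi' hj' hrows0 hind1 v hv
      omega
    exact ⟨rfl, ⟨hlen', hrows', hrow', hcol', hdg', had', hTnew⟩, rfl, rfl, rfl⟩
  -- addition: a queen appears at (i, j)
  · obtain ⟨hold, hv⟩ := hadd
    have hind0 : ind s.cur i j = 0 := by simp [ind, cell] at *; omega
    have hvv : (if v = 1 then (1:ℤ) else 0) = 1 := by rw [if_pos hv]
    have hcrow' : ∀ i1, crow (setCell s.cur i j v) i1 = crow s.cur i1 + (if i1 = i then 1 else 0) := by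
      intro i1
      rw [crow_setCell s.cur i j hi' hj' hrows0 v i1, hvv, hind0]
      by_cases hc : i1 = i <;> simp [hc]
    have hccol' : ∀ j1, ccol (setCell s.cur i j v) j1 = ccol s.cur j1 + (if j1 = j then 1 else 0) := by
      intro j1
      rw [ccol_setCell s.cur i j hi' hj' hrows0 v j1, hvv, hind0]
      by_cases hc : j1 = j <;> simp [hc]
    have hcdg' : ∀ i1 j1, cdg (setCell s.cur i j v) i1 j1 = cdg s.cur i1 j1 + (if i + j1 = i1 + j then 1 else 0) := by
      intro i1 j1
      rw [cdg_setCell s.cur i j hi' hj' hrows0 v i1 j1, hvv, hind0]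
      by_cases hc : i + j1 = i1 + j <;> simp [hc]
    have hcad' : ∀ i1 j1, cad (setCell s.cur i j v) i1 j1 = cad s.cur i1 j1 + (if i + j = i1 + j1 then 1 else 0) := by
      intro i1 j1
      rw [cad_setCell s.cur i j hi' hj' hrows0 v i1 j1, hvv, hind0]
      by_cases hc : i + j = i1 + j1 <;> simp [hc]
    have hrow' : ∀ i1 < N, (s.row.modify (i:Int) 0 (· + 1)).getD (i1:Int) 0 = crow (setCell s.cur i j v) i1 := by
      intro i1 h1
      rw [PySem.Dict.getD_modify, hcrow' i1]
      by_cases hc : i1 = i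
      · subst hc; rw [if_pos rfl, hrow i1 hi, if_pos rfl]
      · rw [if_neg (by omega : ¬ (i1:Int) = (i:Int)), hrow i1 h1, if_neg hc]; ring
    have hcol' : ∀ j1 < N, (s.col.modify (j:Int) 0 (· + 1)).getD (j1:Int) 0 = ccol (setCell s.cur i j v) j1 := by
      intro j1 h1
      rw [PySem.Dict.getD_modify, hccol' j1]
      by_cases hc : j1 = j
      · subst hc; rw [if_pos rfl, hcol j1 hj, if_pos rfl]
      · rw [if_neg (by omega : ¬ (j1:Int) = (j:Int)), hcol j1 h1, if_neg hc]; ring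
    have hdg' : ∀ i1 < N, ∀ j1 < N, (s.dg.modify ((i:Int)-(j:Int)) 0 (· + 1)).getD ((i1:Int)-(j1:Int)) 0 = cdg (setCell s.cur i j v) i1 j1 := by
      intro i1 h1 j1 h2
      rw [PySem.Dict.getD_modify, hcdg' i1 j1]
      by_cases hc : i + j1 = i1 + j
      · rw [if_pos (by omega : (i1:Int)-(j1:Int) = (i:Int)-(j:Int)), hdg i hi j hj, if_pos hc,
          cdg_skew s.cur hc]
      · rw [if_neg (by omega : ¬ (i1:Int)-(j1:Int) = (i:Int)-(j:Int)), hdg i1 h1 j1 h2, if_neg hc]; ring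
    have had' : ∀ i1 < N, ∀ j1 < N, (s.ad.modify ((i:Int)+(j:Int)) 0 (· + 1)).getD ((i1:Int)+(j1:Int)) 0 = cad (setCell s.cur i j v) i1 j1 := by
      intro i1 h1 j1 h2
      rw [PySem.Dict.getD_modify, hcad' i1 j1]
      by_cases hc : i + j = i1 + j1
      · rw [if_pos (by omega : (i1:Int)+(j1:Int) = (i:Int)+(j:Int)), had i hi j hj, if_pos hc,
          cad_skew s.cur hc]
      · rw [if_neg (by omega : ¬ (i1:Int)+(j1:Int) = (i:Int)+(j:Int)), had i1 h1 j1 h2, if_neg hc]; ring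
    have hTnew : s.T + 2 * (s.row.getD (i:Int) 0 + s.col.getD (j:Int) 0 +
          s.dg.getD ((i:Int)-(j:Int)) 0 + s.ad.getD ((i:Int)+(j:Int)) 0)
        = attP (setCell s.cur i j v) := by
      rw [hrow i hi, hcol j hj, hdg i hi j hj, had i hi j hj]
      have hadd2 := attP_add s.cur i j hi' hj' hrows0 hind0
      have hbv : setCell s.cur i j v = setCell s.cur i j 1 := by rw [hv]
      rw [hbv, hadd2]
      omega
    exact ⟨rfl, ⟨hlen', hrows', hrow', hcol', hdg', had', hTnew⟩, rfl, rfl, rfl⟩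
  -- neutral write: queen-ness unchanged
  · have hneu : (if v = 1 then (1:ℤ) else 0) = ind s.cur i j := by
      by_cases hv : v = 1 <;> by_cases hb : cell s.cur i j = 1 <;> simp [ind, cell, hv, hb] at * <;> tauto
    have hpt := ind_setCell_neutral s.cur i j hi' hj' hrows0 v hneu
    have hlen2 : (setCell s.cur i j v).length = s.cur.length := length_setCell s.cur i j v
    refine ⟨rfl, ⟨hlen', hrows', ?_, ?_, ?_, ?_, ?_⟩, rfl, rfl, rfl⟩
    · intro i1 h1; rw [crow_congr (setCell s.cur i j v) s.cur hlen2 hpt i1]; exact hrow i1 h1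
    · intro j1 h1; rw [ccol_congr (setCell s.cur i j v) s.cur hlen2 hpt j1]; exact hcol j1 h1
    · intro i1 h1 j1 h2; rw [cdg_congr (setCell s.cur i j v) s.cur hlen2 hpt i1 j1]; exact hdg i1 h1 j1 h2
    · intro i1 h1 j1 h2; rw [cad_congr (setCell s.cur i j v) s.cur hlen2 hpt i1 j1]; exact had i1 h1 j1 h2
    · rw [attP_congr (setCell s.cur i j v) s.cur hlen2 hpt]; exact hT

lemma step_sim (N i j k : Nat) (hi : i < N) (hj : j < N) (hk : k < N)
    (a : StA) (s : StB) (h : Sim N a s) : Sim N (stepA i j a k) (stepB i j s k) := by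
  obtain ⟨hcur, hba, hbb, hmv, hgood⟩ := h
  unfold stepA stepB
  by_cases hkj : k ≠ j
  · rw [if_pos hkj, if_pos hkj]
    dsimp only
    obtain ⟨hc1, hg1, hb1, hbb1, hm1⟩ := bPut_sim N s hgood i j hi hj 0
    obtain ⟨hc2, hg2, hb2, hbb2, hm2⟩ := bPut_sim N (bPut s i j 0) hg1 i k hi hk 1
    have hT2 : (bPut (bPut s i j 0) i k 1).T = attP (setCell (setCell s.cur i j 0) i k 1) := by
      have := hg2.2.2.2.2.2.2
      rw [this, hc2, hc1]
    have hbest2 : (bPut (bPut s i j 0) i k 1).best = s.best := by rw [hb2, hb1]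
    have hbbs2 : (bPut (bPut s i j 0) i k 1).bb = s.bb := by rw [hbb2, hbb1]
    have hmv2 : (bPut (bPut s i j 0) i k 1).mv = s.mv := by rw [hm2, hm1]
    have hcond : (calcAttacks (setCell (setCell a.cur i j 0) i k 1) < a.ba)
        = ((bPut (bPut s i j 0) i k 1).T < (bPut (bPut s i j 0) i k 1).best) := by
      rw [calcAttacks_eq, hcur, hba, hT2, hbest2]
    set s2 := bPut (bPut s i j 0) i k 1 with hs2
    set s3 := (if s2.T < s2.best then { s2 with best := s2.T, bb := s2.cur, mv := true } else s2) with hs3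
    have hg3 : GoodB N s3 := by
      rw [hs3]
      by_cases hlt : s2.T < s2.best
      · rw [if_pos hlt]; exact hg2
      · rw [if_neg hlt]; exact hg2
    have hc3 : s3.cur = setCell (setCell s.cur i j 0) i k 1 := by
      rw [hs3]
      by_cases hlt : s2.T < s2.best
      · rw [if_pos hlt]; exact hc2.trans (by rw [hc1])
      · rw [if_neg hlt]; exact hc2.trans (by rw [hc1])
    obtain ⟨hc4, hg4, hb4, hbb4, hm4⟩ := bPut_sim N s3 hg3 i j hi hj 1
    obtain ⟨hc5, hg5, hb5, hbb5, hm5⟩ := bPut_sim N (bPut s3 i j 1) hg4 i k hi hk 0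
    refine ⟨?_, ?_, ?_, ?_, hg5⟩
    · rw [hc5, hc4, hc3, hcur]
    · rw [hb5, hb4, hs3]
      by_cases hlt : s2.T < s2.best
      · rw [if_pos hlt,
          if_pos (show calcAttacks (setCell (setCell a.cur i j 0) i k 1) < a.ba from by rw [hcond]; exact hlt)]
        show calcAttacks (setCell (setCell a.cur i j 0) i k 1) = s2.T
        rw [calcAttacks_eq, hcur]
        exact hT2.symm
      · rw [if_neg hlt,
          if_neg (show ¬ calcAttacks (setCell (setCell a.cur i j 0) i k 1) < a.ba from by rw [hcond]; exact hlt)]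
        show a.ba = s2.best
        exact hba.trans hbest2.symm
    · rw [hbb5, hbb4, hs3]
      by_cases hlt : s2.T < s2.best
      · rw [if_pos hlt,
          if_pos (show calcAttacks (setCell (setCell a.cur i j 0) i k 1) < a.ba from by rw [hcond]; exact hlt)]
        show setCell (setCell a.cur i j 0) i k 1 = s2.cur
        rw [hcur, hc2, hc1]
      · rw [if_neg hlt,
          if_neg (show ¬ calcAttacks (setCell (setCell a.cur i j 0) i k 1) < a.ba from by rw [hcond]; exact hlt)]
        show a.bb = s2.bb
        exact hbb.trans hbbs2.symm
    · rw [hm5, hm4, hs3]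
      by_cases hlt : s2.T < s2.best
      · rw [if_pos hlt,
          if_pos (show calcAttacks (setCell (setCell a.cur i j 0) i k 1) < a.ba from by rw [hcond]; exact hlt)]
      · rw [if_neg hlt,
          if_neg (show ¬ calcAttacks (setCell (setCell a.cur i j 0) i k 1) < a.ba from by rw [hcond]; exact hlt)]
        show a.mv = s2.mv
        exact hmv.trans hmv2.symm
  · rw [if_neg hkj, if_neg hkj]
    exact ⟨hcur, hba, hbb, hmv, hgood⟩

lemma loop_sim (N : Nat) (a0 : StA) (s0 : StB) (h : Sim N a0 s0) :
    Sim N (loopA N a0) (loopB N s0) := by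
  unfold loopA loopB
  refine foldl_sim (Sim N) _ _ _ ?_ a0 s0 h
  intro a s i hi hsim
  refine foldl_sim (Sim N) _ _ _ ?_ a s hsim
  intro a' s' j hj hsim'
  by_cases hq : cell s'.cur i j = 1
  · rw [if_pos (show cell a'.cur i j = 1 from by rw [hsim'.1]; exact hq), if_pos hq]
    refine foldl_sim (Sim N) _ _ _ ?_ a' s' hsim'
    intro a'' s'' k hk hsim''
    exact step_sim N i j k (List.mem_range.mp hi) (List.mem_range.mp hj) (List.mem_range.mp hk) a'' s'' hsim''
  · rw [if_neg (show ¬ cell a'.cur i j = 1 from by rw [hsim'.1]; exact hq), if_neg hq]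
    exact hsim'

-- ---- B's initialization ----

lemma countersOf_spec (b : List (List Int)) :
    (∀ i < b.length, (countersOf (queensOf b b.length)).1.getD (i : Int) 0 = crow b i) ∧
    (∀ j < b.length, (countersOf (queensOf b b.length)).2.1.getD (j : Int) 0 = ccol b j) ∧
    (∀ i < b.length, ∀ j < b.length, (countersOf (queensOf b b.length)).2.2.1.getD ((i : Int) - (j : Int)) 0 = cdg b i j) ∧
    (∀ i < b.length, ∀ j < b.length, (countersOf (queensOf b b.length)).2.2.2.getD ((i : Int) + (j : Int)) 0 = cad b i j) := by
  unfold countersOf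
  rw [foldl_counts]
  exact ⟨fun i h => rowD_getD b i h, fun j h => colD_getD b j h,
    fun i h1 j h2 => dgD_getD b i j h1 h2, fun i h1 j h2 => adD_getD b i j h1 h2⟩

lemma tInit_eq (b : List (List Int)) (row col dg ad : PySem.Dict Int Int)
    (hrow : ∀ i < b.length, row.getD (i : Int) 0 = crow b i)
    (hcol : ∀ j < b.length, col.getD (j : Int) 0 = ccol b j)
    (hdg : ∀ i < b.length, ∀ j < b.length, dg.getD ((i : Int) - (j : Int)) 0 = cdg b i j)
    (had : ∀ i < b.length, ∀ j < b.length, ad.getD ((i : Int) + (j : Int)) 0 = cad b i j) :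
    tInit (queensOf b b.length) row col dg ad = attP b := by
  unfold tInit
  rw [PySem.List.foldl_congr_mem (queensOf b b.length) _
    (fun T q => T + ((crow b q.1 - 1) + (ccol b q.2 - 1) + (cdg b q.1 q.2 - 1) + (cad b q.1 q.2 - 1))) 0
    (by
      intro acc q hq
      rw [mem_queensOf] at hq
      rw [hrow q.1 hq.1, hcol q.2 hq.2.1, hdg q.1 hq.1 q.2 hq.2.1, had q.1 hq.1 q.2 hq.2.1]
      ring)]
  rw [PySem.List.foldl_add, sum_map_queensOf]
  unfold attP
  rw [zero_add]
  refine Finset.sum_congr rfl fun i hi => Finset.sum_congr rfl fun j hj => ?_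
  by_cases hb : cell b i j = 1
  · have h1 : ind b i j = 1 := by simp [ind, cell] at *; omega
    rw [if_pos hb, h1, one_mul]
    unfold alq
    rw [h1]
  · have h0 : ind b i j = 0 := by simp [ind, cell] at *; omega
    rw [if_neg hb, h0, zero_mul]

-- ---- the two ports (final shape) ----

theorem move_queen_spec_core (board : List (List Int))
    (hpre : ∀ r ∈ board, board.length ≤ r.length) :
    move_queen board = move_queen_alt board := by
  unfold move_queen move_queen_alt
  dsimp only
  obtain ⟨hrowc, hcolc, hdgc, hadc⟩ := countersOf_spec board
  have hT := tInit_eq board _ _ _ _ hrowc hcolc hdgc hadc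
  have hinit : Sim board.length ⟨board, calcAttacks board, board, false⟩
      ⟨board, (countersOf (queensOf board board.length)).1, (countersOf (queensOf board board.length)).2.1,
       (countersOf (queensOf board board.length)).2.2.1, (countersOf (queensOf board board.length)).2.2.2,
       tInit (queensOf board board.length) (countersOf (queensOf board board.length)).1
         (countersOf (queensOf board board.length)).2.1 (countersOf (queensOf board board.length)).2.2.1
         (countersOf (queensOf board board.length)).2.2.2,
       tInit (queensOf board board.length) (countersOf (queensOf board board.length)).1
         (countersOf (queensOf board board.length)).2.1 (countersOf (queensOf board board.length)).2.2.1
         (countersOf (queensOf board board.length)).2.2.2,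
       board, false⟩ := by
    refine ⟨rfl, ?_, rfl, rfl, rfl, hpre, hrowc, hcolc, hdgc, hadc, ?_⟩
    · rw [calcAttacks_eq, hT]
    · rw [hT]
  have hfin := loop_sim board.length _ _ hinit
  obtain ⟨hc, hba, hbb, hmv, _⟩ := hfin
  rw [hmv, hc, hbb]

-- ===== VERDICT (by name: the statement is the Claim_ definition above) =====
theorem move_queen_spec : Claim_equal_move_queen := by
  intro board hdom hpre
  unfold Spec_move_queen
  exact move_queen_spec_core board hpre
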